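-- pv_equiv track=rewrite | github.com/eclarke/melt | melting.py | _is_sym
-- ===== SOURCE A (Python) =====
-- def _is_sym(seq):
--     """Returns True if s is symmetric (same as rev. complement)"""
--     comp = {
--         'A': 'T',
--         'T': 'A',
--         'G': 'C',
--         'C': 'G'
--     }
--     return seq == ''.join([comp[i] for i in seq][::-1])
-- ===== SOURCE B (Python) =====
-- def _is_sym(seq):
--     """Returns True if s is symmetric (same as rev. complement)"""
--     comp = {
--         'A': 'T',
--         'T': 'A',
--         'G': 'C',
--         'C': 'G'
--     }
--     t = [comp[c] for c in seq]
--     half, odd = divmod(len(seq), 2)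
--     return odd == 0 and t[:half] == list(seq[half:])[::-1]
-- ===== Notes on version B (the rewrite author's own statement) =====
-- stated objective: alternative
-- what changed: B replaces A's build-the-whole-reversed-complement-and-compare with a half-length check: after one complement pass it tests that the length is even and that the complemented first half equals the reversed second half, using the mathematical fact that an odd-length sequence can never equal its reverse complement.
import Mathlib
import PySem

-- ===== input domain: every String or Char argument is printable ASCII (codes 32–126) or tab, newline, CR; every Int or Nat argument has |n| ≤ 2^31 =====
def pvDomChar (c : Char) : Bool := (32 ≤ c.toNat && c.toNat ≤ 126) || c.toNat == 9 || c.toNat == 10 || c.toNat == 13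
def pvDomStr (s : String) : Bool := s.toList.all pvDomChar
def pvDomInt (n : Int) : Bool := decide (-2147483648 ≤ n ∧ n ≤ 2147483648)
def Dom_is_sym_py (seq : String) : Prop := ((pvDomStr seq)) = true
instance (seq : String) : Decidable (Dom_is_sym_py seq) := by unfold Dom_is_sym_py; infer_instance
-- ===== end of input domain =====

-- B replaces A's build-the-whole-reversed-complement-and-compare with a half-length check:
-- one complement pass, then even-length test plus comparison of the complemented first half
-- against the reversed second half (odd length can never be symmetric); alternative, same cost.


-- the dict comp = {'A':'T','T':'A','G':'C','C':'G'}: comp[c] (KeyError outside Pre_; value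
-- outside {A,T,G,C} is irrelevant there, Pre_ excludes it)
def pvComp (c : Char) : Char :=
  if c = 'A' then 'T' else if c = 'T' then 'A' else
  if c = 'G' then 'C' else if c = 'C' then 'G' else c

-- ===== PORT A =====
-- seq == ''.join([comp[i] for i in seq][::-1]) : string equality = char-list equality (exact)
def is_sym_py (seq : String) : Bool :=
  seq.toList == ((seq.toList.map pvComp).reverse)

-- ===== PORT B =====
-- t = [comp[c] for c in seq]; half, odd = divmod(len(seq), 2);
-- return odd == 0 and t[:half] == list(seq[half:])[::-1]
def is_sym_py_alt (seq : String) : Bool :=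
  let t := seq.toList.map pvComp
  let half : Int := PySem.Int.floordiv (seq.toList.length : Int) 2
  let odd : Int := PySem.Int.mod (seq.toList.length : Int) 2
  odd == 0 && (PySem.List.slice t none (some half) == (PySem.List.slice seq.toList (some half) none).reverse)

-- ===== PRECONDITION & SPEC =====
-- Pre_ excludes exactly the strings containing a character other than A/T/G/C: there the
-- dict lookup comp[c] raises KeyError in A (and in B alike).
def Pre_is_sym_py (seq : String) : Prop :=
  (seq.toList.all fun c => c == 'A' || c == 'T' || c == 'G' || c == 'C') = true
instance (seq : String) : Decidable (Pre_is_sym_py seq) := by unfold Pre_is_sym_py; infer_instance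
def pvWitness_is_sym_py : String := "AT"

def Spec_is_sym_py (seq : String) (out : Bool) : Prop := out = is_sym_py_alt seq
instance (seq : String) (out : Bool) : Decidable (Spec_is_sym_py seq out) := by unfold Spec_is_sym_py; infer_instance

-- ===== CLAIM =====
def Claim_equal_is_sym_py : Prop := ∀ (seq : String), Dom_is_sym_py seq → Pre_is_sym_py seq → Spec_is_sym_py seq (is_sym_py seq)

-- ===== LEMMAS AND PROOFS =====

theorem pvComp_involutive {c : Char} (h : c = 'A' ∨ c = 'T' ∨ c = 'G' ∨ c = 'C') :
    pvComp (pvComp c) = c := by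
  rcases h with h | h | h | h <;> subst h <;> decide

theorem pvComp_ne {c : Char} (h : c = 'A' ∨ c = 'T' ∨ c = 'G' ∨ c = 'C') :
    pvComp c ≠ c := by
  rcases h with h | h | h | h <;> subst h <;> decide

-- core: for lists of A/T/G/C characters, "l equals its reversed complement" is
-- "even length and complemented first half equals reversed second half"
theorem pv_core (l : List Char) (hpre : ∀ c ∈ l, c = 'A' ∨ c = 'T' ∨ c = 'G' ∨ c = 'C') :
    (l = (l.map pvComp).reverse) ↔
      (l.length % 2 = 0 ∧ (l.map pvComp).take (l.length / 2) = (l.drop (l.length / 2)).reverse) := by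
  set t := l.map pvComp with ht
  have hlen : t.length = l.length := by simp [ht]
  constructor
  · intro hA
    have hrev : l.reverse = t := by rw [hA, List.reverse_reverse]
    have heven : l.length % 2 = 0 := by
      by_contra hodd
      have hk : l.length / 2 < l.length := by omega
      set k := l.length / 2 with hkdef
      have hkk : l.length - 1 - k = k := by omega
      have h1 : l[k] = t[k]'(by omega) := by
        have := List.getElem_of_eq hA hk
        rw [this, List.getElem_reverse]
        congr 1
        omega
      have h2 : t[k]'(by omega) = pvComp l[k] := by simp [ht]
      exact pvComp_ne (hpre _ (List.getElem_mem _)) (by rw [← h2, ← h1])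
    refine ⟨heven, ?_⟩
    rw [List.reverse_drop, hrev]
    congr 1
    omega
  · rintro ⟨heven, hhalf⟩
    set h := l.length / 2 with hdef
    have hdropmap : t.drop h = (l.drop h).map pvComp := by simp [ht]
    have htakemap : t.take h = (l.take h).map pvComp := by simp [ht]
    have hmapmap : ∀ xs : List Char, (∀ c ∈ xs, c ∈ l) → (xs.map pvComp).map pvComp = xs := by
      intro xs hsub
      rw [List.map_map]
      have : xs.map (pvComp ∘ pvComp) = xs.map id := by
        apply List.map_congr_left
        intro a ha
        exact pvComp_involutive (hpre _ (hsub _ ha))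
      simpa using this
    -- from hhalf: (l.take h).map pvComp = (l.drop h).reverse; apply pvComp-map to both sides
    have key : (l.take h).reverse = (l.drop h).map pvComp := by
      have e1 : (l.take h).map pvComp = (l.drop h).reverse := by rw [← htakemap]; exact hhalf
      have e2 : ((l.take h).map pvComp).map pvComp = ((l.drop h).reverse).map pvComp := by
        rw [e1]
      rw [hmapmap _ (fun c hc => List.mem_of_mem_take hc)] at e2
      rw [e2, List.map_reverse, List.reverse_reverse]
    have hrt : l.reverse = t := by
      conv_lhs => rw [← List.take_append_drop h l]
      rw [List.reverse_append]
      conv_rhs => rw [← List.take_append_drop h t]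
      rw [← hhalf, key, ← hdropmap]
    rw [← hrt, List.reverse_reverse]

theorem is_sym_py_spec : Claim_equal_is_sym_py := by
  intro seq _ hpre0
  have hpre : ∀ c ∈ seq.toList, c = 'A' ∨ c = 'T' ∨ c = 'G' ∨ c = 'C' := by
    intro c hc
    have := by simpa [Pre_is_sym_py, List.all_eq_true, Bool.or_eq_true, beq_iff_eq] using hpre0
    have h2 := this c hc
    tauto
  unfold Spec_is_sym_py is_sym_py is_sym_py_alt
  set l := seq.toList with hl
  have hfd : PySem.Int.floordiv (l.length : Int) 2 = ((l.length / 2 : Nat) : Int) := by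
    exact_mod_cast PySem.Int.floordiv_natCast l.length 2
  have hmod : PySem.Int.mod (l.length : Int) 2 = ((l.length % 2 : Nat) : Int) := by
    exact_mod_cast PySem.Int.mod_natCast l.length 2
  simp only [hfd, hmod, PySem.List.slice_to_natCast, PySem.List.slice_from_natCast]
  rw [Bool.eq_iff_iff]
  simp only [beq_iff_eq, Bool.and_eq_true]
  rw [pv_core l hpre]
  constructor
  · rintro ⟨he, hh⟩; exact ⟨by exact_mod_cast he, hh⟩
  · rintro ⟨he, hh⟩; exact ⟨by exact_mod_cast he, hh⟩

-- ===== VERDICT =====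
-- (theorem is_sym_py_spec above proves Claim_equal_is_sym_py)
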